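-- pv_equiv track=rewrite | github.com/siggib007/qualys | QualysSample2.py | ValidMask
-- ===== SOURCE A (Python) =====
-- def DotDec2Int (strValue):
-- 	strHex = ""
-- 	if ValidateIP(strValue) == False:
-- 		return -10
-- 	# end if
--
-- 	Quads = strValue.split(".")
-- 	for Q in Quads:
-- 		QuadHex = hex(int(Q))
-- 		strwp = "00"+ QuadHex[2:]
-- 		strHex = strHex + strwp[-2:]
-- 	# next
--
-- 	return int(strHex,16)
--
-- def ValidateIP(strToCheck):
-- 	Quads = strToCheck.split(".")
-- 	if len(Quads) != 4:
-- 		return False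
-- 	# end if
--
-- 	for Q in Quads:
-- 		try:
-- 			iQuad = int(Q)
-- 		except ValueError:
-- 			return False
-- 		# end try
--
-- 		if iQuad > 255 or iQuad < 0:
-- 			return False
-- 		# end if
--
-- 	return True
--
-- def ValidMask(strToCheck):
-- 	iNumBits=0
-- 	if ValidateIP(strToCheck) == False:
-- 		return 0
-- 	# end if
--
-- 	iDecValue = DotDec2Int(strToCheck)
-- 	strBinary = bin(iDecValue)
--
-- 	strTemp = "0"*32 + strBinary[2:]
-- 	strBinary = strTemp[-32:]
-- 	cBit = strBinary[0]
-- 	bFound = False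
-- 	x=0
-- 	for c in strBinary:
-- 		x=x+1
-- 		if cBit != c:
-- 			iNumBits = x-1
-- 			if bFound:
-- 				return 0
-- 			else:
-- 				cBit=c
-- 				bFound = True
-- 			# end if
-- 		# end if
-- 	# next
-- 	if iNumBits==0:
-- 		iNumBits = x
-- 	# end if
-- 	return iNumBits
-- ===== SOURCE B (Python) =====
-- def ValidMask(strToCheck):
--     # Arithmetic bit-twiddling classification: no binary string is built and no
--     # bit-by-bit scan is done; a value has at most one bit transition iff v+1 or
--     # 2**32-v is a power of two (tested with the n & (n-1) trick), and the
--     # leading-run length falls out of bit_length().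
--     quads = strToCheck.split(".")
--     if len(quads) != 4:
--         return 0
--     try:
--         vals = [int(q) for q in quads]
--     except ValueError:
--         return 0
--     if any(n < 0 or n > 255 for n in vals):
--         return 0
--     a, b, c, d = vals
--     v = ((a * 256 + b) * 256 + c) * 256 + d
--     if v == 0 or v == 0xFFFFFFFF:
--         return 32
--     if (v + 1) & v == 0:          # bits are 0...01...1: v = 2**m - 1
--         return 32 - v.bit_length()
--     w = 0x100000000 - v
--     if w & (w - 1) == 0:          # bits are 1...10...0: v = 2**32 - 2**k
--         return 32 - (w.bit_length() - 1)
--     return 0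
-- ===== Notes on version B (the rewrite author's own statement) =====
-- stated objective: alternative
-- what changed: B never builds a binary string nor scans bits or runs: it classifies the 32-bit value purely arithmetically, testing whether v+1 or 2**32-v is a power of two with the n&(n-1) bit trick and reading the leading-run length off bit_length(), where A converts to a zero-padded binary string and scans it character by character counting transitions.
import Mathlib
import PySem

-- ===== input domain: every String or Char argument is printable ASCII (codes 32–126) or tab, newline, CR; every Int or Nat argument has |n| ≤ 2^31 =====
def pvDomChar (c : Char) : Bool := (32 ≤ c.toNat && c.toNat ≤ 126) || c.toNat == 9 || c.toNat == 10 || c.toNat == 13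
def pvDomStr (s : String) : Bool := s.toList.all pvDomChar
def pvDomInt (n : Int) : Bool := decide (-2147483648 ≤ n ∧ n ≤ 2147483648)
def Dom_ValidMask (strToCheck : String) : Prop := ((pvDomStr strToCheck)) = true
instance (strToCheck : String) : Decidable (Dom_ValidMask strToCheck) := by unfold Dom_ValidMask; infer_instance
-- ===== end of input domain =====

-- B replaces A's build-a-binary-string-and-scan-it transition count by a purely
-- arithmetic classification: v+1 or 2^32-v a power of two (n&(n-1) trick) plus
-- bit_length (objective: alternative algorithm, no bit string and no scan).

-- ===== PORT A =====

-- for Q in Quads: try iQuad = int(Q) except: return False; if iQuad > 255 or iQuad < 0: return False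
def vipLoop : List String → Bool
  | [] => true
  | q :: rest =>
    match PySem.Int.ofStr? q with
    | none => false
    | some iQuad => if iQuad > 255 || iQuad < 0 then false else vipLoop rest

def ValidateIP (strToCheck : String) : Bool :=
  let quads := (PySem.Str.split? strToCheck ".").getD []   -- sep "." ≠ "": split? is always some
  if quads.length ≠ 4 then false else vipLoop quads

-- int(strHex, 16), hand-ported: exact on the only strings DotDec2Int builds
-- (nonempty lists of lowercase hex digits, no sign/space/underscore/prefix handling needed)
def hexVal (c : Char) : Int := if 97 ≤ c.toNat then (c.toNat : Int) - 87 else (c.toNat : Int) - 48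
def parseHex16 (cs : List Char) : Int := cs.foldl (fun a c => a * 16 + hexVal c) 0

-- for Q in Quads: QuadHex = hex(int(Q)); strwp = "00"+QuadHex[2:]; strHex = strHex + strwp[-2:]
-- hex(n) ported as '0'::'x'::Nat.toDigits 16 n — exact for n ≥ 0, the only case reached
-- (int(Q) is guarded by ValidateIP, so ofStr? is always some here; .getD 0 is an unreachable default)
def ddLoop : List String → List Char → List Char
  | [], strHex => strHex
  | q :: rest, strHex =>
    let quadHex := '0' :: 'x' :: Nat.toDigits 16 ((PySem.Int.ofStr? q).getD 0).toNat
    let strwp := '0' :: '0' :: quadHex.drop 2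
    ddLoop rest (strHex ++ PySem.List.slice strwp (some (-2)) none)

def DotDec2Int (strValue : String) : Int :=
  if ValidateIP strValue == false then -10
  else
    let quads := (PySem.Str.split? strValue ".").getD []
    parseHex16 (ddLoop quads [])

-- the scan: x counts chars, cBit the current run's char, bFound whether a transition was seen
def vmLoop : List Char → Int → Int → Char → Bool → Int
  | [], iNumBits, x, _, _ => if iNumBits == 0 then x else iNumBits
  | c :: rest, iNumBits, x, cBit, bFound =>
    let x' := x + 1
    if cBit != c then
      if bFound then 0 else vmLoop rest (x' - 1) x' c true
    else vmLoop rest iNumBits x' cBit bFound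

def ValidMask (strToCheck : String) : Int :=
  if ValidateIP strToCheck == false then 0
  else
    let iDecValue := DotDec2Int strToCheck
    let strBinary := PySem.Int.toBinChars0b iDecValue        -- bin(iDecValue), as List Char
    let strTemp := List.replicate 32 '0' ++ strBinary.drop 2
    let strBinary2 := PySem.List.slice strTemp (some (-32)) none
    let cBit := (PySem.List.pyGet? strBinary2 0).getD '0'    -- strBinary[0]; strTemp has ≥ 32 chars
    vmLoop strBinary2 0 0 cBit false

-- ===== PORT B =====

def ValidMask_alt (strToCheck : String) : Int :=
  let quads := (PySem.Str.split? strToCheck ".").getD []     -- sep "." ≠ "": split? is always some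
  if quads.length ≠ 4 then 0
  else
    match quads.mapM PySem.Int.ofStr? with                   -- [int(q) for q in quads]; none = ValueError
    | none => 0
    | some vals =>
      if vals.any (fun n => decide (n < 0) || decide (255 < n)) then 0
      else
        match vals with
        | [a, b, c, d] =>
          let v := ((a * 256 + b) * 256 + c) * 256 + d
          if (v == 0 || v == 4294967295) then 32
          else if PySem.Int.band (v + 1) v == 0 then 32 - (PySem.Int.bitLength v : Int)
          else
            let w := 4294967296 - v
            if PySem.Int.band w (w - 1) == 0 then 32 - ((PySem.Int.bitLength w : Int) - 1)
            else 0
        | _ => 0                                             -- unreachable: vals has 4 elements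

-- ===== PRECONDITION & SPEC =====
def Spec_ValidMask (strToCheck : String) (out : Int) : Prop := out = ValidMask_alt strToCheck
instance (strToCheck : String) (out : Int) : Decidable (Spec_ValidMask strToCheck out) := by unfold Spec_ValidMask; infer_instance

-- ===== CLAIM (what is proved, stated in full; the proofs are below) =====
def Claim_equal_ValidMask : Prop := ∀ (strToCheck : String), Dom_ValidMask strToCheck → Spec_ValidMask strToCheck (ValidMask strToCheck)

-- ===== LEMMAS AND PROOFS =====

-- proof-side reference parser: accumulates the 32-bit value while validating
def altParse : List String → Int → Option Int
  | [], v => some v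
  | q :: rest, v =>
    match PySem.Int.ofStr? q with
    | none => none
    | some n => if n < 0 || n > 255 then none else altParse rest (v * 256 + n)

theorem vipLoop_eq_isSome (qs : List String) (w : Int) :
    vipLoop qs = (altParse qs w).isSome := by
  induction qs generalizing w with
  | nil => simp [vipLoop, altParse]
  | cons q rest ih =>
    simp only [vipLoop, altParse]
    cases PySem.Int.ofStr? q with
    | none => simp
    | some n =>
      by_cases h : n < 0 ∨ 255 < n
      · have h1 : (n > 255 || n < 0) = true := by simp only [Bool.or_eq_true, decide_eq_true_eq]; omega
        have h2 : (n < 0 || n > 255) = true := by simp only [Bool.or_eq_true, decide_eq_true_eq]; omega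
        simp [h1, h2]
      · have h1 : (n > 255 || n < 0) = false := by simp only [Bool.or_eq_false_iff, decide_eq_false_iff_not]; omega
        have h2 : (n < 0 || n > 255) = false := by simp only [Bool.or_eq_false_iff, decide_eq_false_iff_not]; omega
        simp only [h1, h2]
        exact ih _

theorem altParse_bounds (qs : List String) (w r : Int) (hw : 0 ≤ w)
    (h : altParse qs w = some r) : 0 ≤ r ∧ r < (w + 1) * 256 ^ qs.length := by
  induction qs generalizing w r with
  | nil =>
    simp only [altParse, Option.some.injEq] at h
    subst h
    constructor
    · exact hw
    · simp only [List.length_nil, pow_zero, mul_one]; omega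
  | cons q rest ih =>
    simp only [altParse] at h
    cases hq : PySem.Int.ofStr? q with
    | none => simp [hq] at h
    | some n =>
      simp only [hq] at h
      by_cases hn : (n < 0 || n > 255) = true
      · simp [hn] at h
      · rw [if_neg hn] at h
        simp only [Bool.or_eq_true, decide_eq_true_eq, not_or, not_lt] at hn
        have hw' : 0 ≤ w * 256 + n := by nlinarith [hn.1]
        obtain ⟨h1, h2⟩ := ih (w * 256 + n) r hw' h
        refine ⟨h1, ?_⟩
        have hp : (0:Int) < 256 ^ rest.length := by positivity
        have : (w * 256 + n + 1) * 256 ^ rest.length ≤ (w + 1) * 256 ^ (q :: rest).length := by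
          simp only [List.length_cons, pow_succ]
          nlinarith [hn.2, hp]
        omega

-- altParse as B's staged mapM / range-check / fold
theorem altParse_eq (qs : List String) (w : Int) :
    altParse qs w =
      match qs.mapM PySem.Int.ofStr? with
      | none => none
      | some vals =>
        if vals.any (fun n => decide (n < 0) || decide (255 < n)) then none
        else some (vals.foldl (fun a n => a * 256 + n) w) := by
  induction qs generalizing w with
  | nil => simp [altParse]
  | cons q rest ih =>
    simp only [altParse, List.mapM_cons]
    cases hq : PySem.Int.ofStr? q with
    | none => simp
    | some n =>
      simp only [Option.bind_eq_bind, Option.bind_some]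
      cases hrest : rest.mapM PySem.Int.ofStr? with
      | none =>
        simp only [Option.bind_none]
        by_cases hn : (n < 0 || n > 255) = true
        · simp [hn]
        · rw [if_neg hn, ih, hrest]
      | some vals =>
        simp only [Option.bind_some, Option.pure_def]
        by_cases hn : (n < 0 || n > 255) = true
        · have hn2 : (decide (n < 0) || decide (255 < n)) = true := by
            simpa [Bool.or_eq_true, decide_eq_true_eq] using hn
          simp [hn, List.any_cons]
        · have hn' : (decide (n < 0) || decide (255 < n)) = false := by
            simp only [Bool.or_eq_true, decide_eq_true_eq] at hn
            simp only [Bool.or_eq_false_iff, decide_eq_false_iff_not]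
            omega
          rw [if_neg hn, ih, hrest]
          simp [List.any_cons, hn', List.foldl_cons]

theorem mapM_len (qs : List String) (vals : List Int)
    (h : qs.mapM PySem.Int.ofStr? = some vals) : vals.length = qs.length := by
  induction qs generalizing vals with
  | nil => simp_all
  | cons q rest ih =>
    simp only [List.mapM_cons, Option.bind_eq_bind] at h
    cases hq : PySem.Int.ofStr? q with
    | none => simp [hq] at h
    | some n =>
      rw [hq, Option.bind_some] at h
      cases hrest : rest.mapM PySem.Int.ofStr? with
      | none => simp [hrest] at h
      | some vs =>
        rw [hrest, Option.bind_some] at h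
        simp only [Option.pure_def, Option.some.injEq] at h
        subst h
        simp [ih vs hrest]

-- Nat.toDigits recurrences (fuel-irrelevance core lemma, then the two unfoldings)
theorem tdc (b : Nat) (hb : 2 ≤ b) : ∀ n, ∀ f l, n < f →
    Nat.toDigitsCore b f n l = Nat.toDigitsCore b (n + 1) n [] ++ l := by
  intro n
  induction n using Nat.strong_induction_on with
  | _ n ih =>
    intro f l hf
    match f with
    | f' + 1 =>
      have hle : n ≤ f' := Nat.lt_succ_iff.mp hf
      rw [Nat.toDigitsCore]
      rw [show Nat.toDigitsCore b (n+1) n [] = if n / b = 0 then [(n % b).digitChar] else Nat.toDigitsCore b n (n / b) ((n % b).digitChar :: []) from by rw [Nat.toDigitsCore]]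
      by_cases h0 : n / b = 0
      · simp [h0]
      · simp only [h0, if_false]
        have hn0 : 0 < n := Nat.pos_of_ne_zero (fun e => h0 (by simp [e]))
        have hnb : n / b < n := Nat.div_lt_self hn0 (by omega)
        rw [ih (n / b) hnb f' _ (lt_of_lt_of_le hnb hle), ih (n / b) hnb n _ hnb]
        simp

theorem toDigits_small (b n : Nat) (hn : n < b) : Nat.toDigits b n = [Nat.digitChar n] := by
  show Nat.toDigitsCore b (n + 1) n [] = _
  rw [Nat.toDigitsCore]
  simp [Nat.div_eq_of_lt hn, Nat.mod_eq_of_lt hn]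

theorem toDigits_step (b n : Nat) (hb : 2 ≤ b) (hn : b ≤ n) :
    Nat.toDigits b n = Nat.toDigits b (n / b) ++ [Nat.digitChar (n % b)] := by
  show Nat.toDigitsCore b (n + 1) n [] = _
  rw [Nat.toDigitsCore]
  have h0 : ¬ n / b = 0 := by
    have := Nat.one_le_div_iff (by omega : 0 < b) |>.mpr hn
    omega
  simp only [h0, if_false]
  have hnb : n / b < n := Nat.div_lt_self (by omega) (by omega)
  rw [tdc b hb (n / b) n _ hnb]
  rfl

-- the hex pair "00"+hex(n)[2:] then [-2:]
theorem hexPair (n : Nat) (hn : n < 256) :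
    PySem.List.slice ('0' :: '0' :: (('0' :: 'x' :: Nat.toDigits 16 n).drop 2)) (some (-2)) none
      = [Nat.digitChar (n / 16), Nat.digitChar (n % 16)] := by
  have hdrop : ('0' :: 'x' :: Nat.toDigits 16 n).drop 2 = Nat.toDigits 16 n := rfl
  rw [hdrop]
  by_cases h16 : n < 16
  · rw [toDigits_small 16 n h16]
    rw [PySem.List.slice_from_neg_ofNat _ 2 (by omega)]
    simp only [List.length_cons, List.length_nil]
    rw [Nat.div_eq_of_lt h16, Nat.mod_eq_of_lt h16]
    rfl
  · rw [toDigits_step 16 n (by omega) (by omega),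
      toDigits_small 16 (n / 16) (by omega)]
    rw [PySem.List.slice_from_neg_ofNat _ 2 (by omega)]
    rfl

theorem hexVal_digitChar (d : Nat) (hd : d < 16) : hexVal (Nat.digitChar d) = (d : Int) := by
  interval_cases d <;> decide

-- DotDec2Int's hex round-trip computes the arithmetic accumulation
theorem ddLoop_parse (qs : List String) (acc : List Char) (w r : Int) (hw : 0 ≤ w)
    (h : altParse qs w = some r) (hacc : parseHex16 acc = w) :
    parseHex16 (ddLoop qs acc) = r := by
  induction qs generalizing acc w r with
  | nil =>
    simp only [altParse, Option.some.injEq] at h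
    simp only [ddLoop, hacc, h]
  | cons q rest ih =>
    simp only [altParse] at h
    cases hq : PySem.Int.ofStr? q with
    | none => simp [hq] at h
    | some n =>
      simp only [hq] at h
      by_cases hn : (n < 0 || n > 255) = true
      · simp [hn] at h
      · rw [if_neg hn] at h
        simp only [Bool.or_eq_true, decide_eq_true_eq, not_or, not_lt] at hn
        obtain ⟨hn0, hn255⟩ := hn
        have hnt : n.toNat < 256 := by omega
        have hcast : ((n.toNat : Nat) : Int) = n := Int.toNat_of_nonneg hn0
        simp only [ddLoop, hq, Option.getD_some]
        rw [hexPair n.toNat hnt]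
        refine ih _ (w * 256 + n) r (by omega) h ?_
        have h1 : n.toNat / 16 < 16 := by omega
        have h2 : n.toNat % 16 < 16 := by omega
        simp only [parseHex16, List.foldl_append, List.foldl]
        rw [show List.foldl (fun a c => a * 16 + hexVal c) 0 acc = w from hacc]
        rw [hexVal_digitChar _ h1, hexVal_digitChar _ h2]
        omega

-- LSB-first bit expansion of a value (proof-side)
def altBits : Nat → Int → List Int
  | 0, _ => []
  | k + 1, v => PySem.Int.mod v 2 :: altBits k (PySem.Int.floordiv v 2)

-- big-endian k-bit expansion
def bitsBE (k : Nat) (n : Nat) : List Int := (altBits k ((n : Nat) : Int)).reverse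

theorem modCast (m : Nat) : PySem.Int.mod ((m : Nat) : Int) 2 = ((m % 2 : Nat) : Int) := by
  exact_mod_cast PySem.Int.mod_natCast m 2

theorem divCast (m : Nat) : PySem.Int.floordiv ((m : Nat) : Int) 2 = ((m / 2 : Nat) : Int) := by
  exact_mod_cast PySem.Int.floordiv_natCast m 2

theorem bitsBE_succ (k n : Nat) :
    bitsBE (k + 1) n = bitsBE k (n / 2) ++ [((n % 2 : Nat) : Int)] := by
  simp [bitsBE, altBits]

theorem altBits_zero (k : Nat) : altBits k (((0 : Nat) : Int)) = List.replicate k 0 := by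
  induction k with
  | zero => rfl
  | succ k ih =>
    simp only [altBits, modCast 0, divCast 0]
    rw [show ((0:Nat)/2) = 0 from rfl] at *
    simp only [ih]
    simp [List.replicate_succ]

theorem bitsBE_zero (k : Nat) : bitsBE k 0 = List.replicate k 0 := by
  rw [bitsBE, altBits_zero]
  simp

theorem altBits_length (k : Nat) (v : Int) : (altBits k v).length = k := by
  induction k generalizing v with
  | zero => rfl
  | succ k ih => simp [altBits, ih]

theorem bitsBE_length (k n : Nat) : (bitsBE k n).length = k := by
  simp [bitsBE, altBits_length]

theorem bitsBE_bits (k n : Nat) : ∀ b ∈ bitsBE k n, b = 0 ∨ b = 1 := by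
  induction k generalizing n with
  | zero => intro b hb; simp [bitsBE, altBits] at hb
  | succ k ih =>
    intro b hb
    rw [bitsBE_succ] at hb
    rcases List.mem_append.mp hb with h | h
    · exact ih (n / 2) b h
    · simp only [List.mem_singleton] at h
      subst h
      have : n % 2 < 2 := Nat.mod_lt _ (by omega)
      omega

def bitChar (b : Int) : Char := Nat.digitChar b.toNat

-- A's zero-padded binary string is the char image of the k-bit expansion
theorem padBits (k n : Nat) (hk : 1 ≤ k) (hn : n < 2 ^ k) :
    List.replicate (k - (Nat.toDigits 2 n).length) '0' ++ Nat.toDigits 2 n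
      = (bitsBE k n).map bitChar := by
  induction k, hk using Nat.le_induction generalizing n with
  | base => interval_cases n <;> decide
  | succ k hk ih =>
    by_cases h2 : n < 2
    · have hd : n / 2 = 0 := by omega
      have hm : n % 2 = n := by omega
      rw [bitsBE_succ, hd, hm, bitsBE_zero, toDigits_small 2 n h2]
      simp only [List.length_cons, List.length_nil, List.map_append, List.map_replicate,
        List.map_cons, List.map_nil, Nat.add_sub_cancel]
      have hbc : bitChar ((n : Nat) : Int) = Nat.digitChar n := by simp [bitChar]
      rw [hbc]
      simp [show bitChar 0 = '0' from rfl]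
    · rw [toDigits_step 2 n (by omega) (by omega)]
      have hlen : (Nat.toDigits 2 (n / 2) ++ [Nat.digitChar (n % 2)]).length
          = (Nat.toDigits 2 (n / 2)).length + 1 := by simp
      rw [hlen]
      have harith : k + 1 - ((Nat.toDigits 2 (n / 2)).length + 1)
          = k - (Nat.toDigits 2 (n / 2)).length := by omega
      rw [harith, ← List.append_assoc]
      rw [ih (n / 2) (by
        have : 2 ^ (k + 1) = 2 ^ k * 2 := by ring
        omega)]
      rw [bitsBE_succ]
      have htn : (((n : Int)) % 2).toNat = n % 2 := by omega
      simp [bitChar, htn]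

-- run-length grouping of the bit list, most recent run in front (proof-side)
def altRuns : List Int → List (Int × Int) → List (Int × Int)
  | [], runs => runs
  | b :: rest, runs =>
    match runs with
    | (c, k) :: rs => if c == b then altRuns rest ((c, k + 1) :: rs) else altRuns rest ((b, 1) :: (c, k) :: rs)
    | [] => altRuns rest [(b, 1)]

-- the classification both programs compute from the run list
def G : List (Int × Int) → Int → Int
  | [_], total => total
  | [_, r], _ => r.2
  | _, _ => 0

theorem bitChar_inj (a b : Int) (ha : a = 0 ∨ a = 1) (hb : b = 0 ∨ b = 1) :
    (bitChar a = bitChar b) ↔ a = b := by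
  rcases ha with rfl | rfl <;> rcases hb with rfl | rfl <;> simp [bitChar] <;> decide

theorem altRuns_length_le (bs : List Int) (acc : List (Int × Int)) :
    acc.length ≤ (altRuns bs acc).length := by
  induction bs generalizing acc with
  | nil => simp [altRuns]
  | cons b rest ih =>
    cases acc with
    | nil =>
      simp only [altRuns]
      exact Nat.zero_le _
    | cons p rs =>
      obtain ⟨c, k⟩ := p
      simp only [altRuns]
      by_cases hcb : (c == b) = true
      · rw [if_pos hcb]
        exact le_trans (by simp) (ih ((c, k + 1) :: rs))
      · rw [if_neg hcb]
        exact le_trans (Nat.le_succ _) (ih ((b, 1) :: (c, k) :: rs))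

theorem G_of_three_le (rs : List (Int × Int)) (t : Int) (h : 3 ≤ rs.length) : G rs t = 0 := by
  match rs, h with
  | a :: b :: c :: rest, _ => rfl

-- phase 2 of A's scan (a transition already found, first-run length k1 fixed)
theorem phase2 (bs : List Int) (c : Int) (x cnt2 : Int) (f k1 : Int) (t : Int)
    (hbs : ∀ b ∈ bs, b = 0 ∨ b = 1) (hc : c = 0 ∨ c = 1) (hk1 : 1 ≤ k1) :
    vmLoop (bs.map bitChar) k1 x (bitChar c) true
      = G (altRuns bs ((c, cnt2) :: (f, k1) :: [])) t := by
  induction bs generalizing c cnt2 x with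
  | nil =>
    simp only [List.map_nil, vmLoop, altRuns]
    have hk : (k1 == 0) = false := by simp; omega
    rw [hk]
    rfl
  | cons b rest ih =>
    have hb : b = 0 ∨ b = 1 := hbs b (List.mem_cons_self ..)
    have hrest : ∀ x ∈ rest, x = 0 ∨ x = 1 := fun x hx => hbs x (List.mem_cons_of_mem _ hx)
    simp only [List.map_cons, vmLoop, altRuns]
    by_cases hcb : c = b
    · subst hcb
      simp only [bne_self_eq_false, Bool.false_eq_true, if_false, beq_self_eq_true, if_true]
      exact ih c (x + 1) (cnt2 + 1) hrest hc
    · have hne : bitChar c ≠ bitChar b := fun e => hcb ((bitChar_inj c b hc hb).mp e)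
      have h1 : (bitChar c != bitChar b) = true := by simpa [bne_iff_ne] using hne
      have h2 : (c == b) = false := by simpa using hcb
      rw [if_pos h1, h2]
      simp only [if_true]
      refine Eq.symm (G_of_three_le _ _ ?_)
      exact le_trans (by simp) (altRuns_length_le rest ((b, 1) :: (c, cnt2) :: (f, k1) :: []))

-- phase 1 of A's scan (still inside the first run, x = its length so far)
theorem phase1 (bs : List Int) (c : Int) (cnt : Int)
    (hbs : ∀ b ∈ bs, b = 0 ∨ b = 1) (hc : c = 0 ∨ c = 1) (hcnt : 1 ≤ cnt) :
    vmLoop (bs.map bitChar) 0 cnt (bitChar c) false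
      = G (altRuns bs [(c, cnt)]) (cnt + bs.length) := by
  induction bs generalizing c cnt with
  | nil =>
    simp only [List.map_nil, vmLoop, altRuns, List.length_nil]
    simp [G]
  | cons b rest ih =>
    have hb : b = 0 ∨ b = 1 := hbs b (List.mem_cons_self ..)
    have hrest : ∀ x ∈ rest, x = 0 ∨ x = 1 := fun x hx => hbs x (List.mem_cons_of_mem _ hx)
    simp only [List.map_cons, vmLoop, altRuns]
    by_cases hcb : c = b
    · subst hcb
      simp only [bne_self_eq_false, Bool.false_eq_true, if_false, beq_self_eq_true, if_true]
      have htot : cnt + ((c :: rest).length : Int) = (cnt + 1) + (rest.length : Int) := by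
        simp only [List.length_cons]
        push_cast
        ring
      rw [htot]
      exact ih c (cnt + 1) hrest hc (by omega)
    · have hne : bitChar c ≠ bitChar b := fun e => hcb ((bitChar_inj c b hc hb).mp e)
      have h1 : (bitChar c != bitChar b) = true := by simpa [bne_iff_ne] using hne
      have h2 : (c == b) = false := by simpa using hcb
      rw [if_pos h1, h2]
      simp only [Bool.false_eq_true, if_false]
      have hx : cnt + 1 - 1 = cnt := by ring
      rw [hx]
      exact phase2 rest b (cnt + 1) 1 c cnt _ hrest hb hcnt

-- ===== bit-twiddling facts =====

theorem land_pow_pred (m : Nat) : (2 ^ m) &&& (2 ^ m - 1) = 0 := by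
  apply Nat.eq_of_testBit_eq
  intro i
  rw [Nat.testBit_and, Nat.zero_testBit, Nat.testBit_two_pow, Nat.testBit_two_pow_sub_one]
  by_cases h : m = i <;> simp [h]

theorem land_pred_pow (n : Nat) (h : n &&& (n - 1) = 0) : n = 0 ∨ ∃ k, n = 2 ^ k := by
  induction n using Nat.strong_induction_on with
  | _ n ih =>
    rcases Nat.eq_zero_or_pos n with h0 | h0
    · exact Or.inl h0
    rcases Nat.even_or_odd n with he | ho
    · obtain ⟨a, ha⟩ := he
      have ha2 : n = 2 * a := by omega
      have ha0 : 0 < a := by omega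
      have hsub : a &&& (a - 1) = 0 := by
        apply Nat.eq_of_testBit_eq
        intro i
        rw [Nat.testBit_and, Nat.zero_testBit]
        have := congrArg (fun x => x.testBit (i + 1)) h
        simp only [Nat.testBit_and, Nat.zero_testBit] at this
        rw [Nat.testBit_add_one, Nat.testBit_add_one] at this
        rw [show n / 2 = a from by omega, show (n - 1) / 2 = a - 1 from by omega] at this
        exact this
      rcases ih a (by omega) hsub with h1 | ⟨k, hk⟩
      · omega
      · exact Or.inr ⟨k + 1, by rw [ha2, hk]; ring⟩
    · obtain ⟨a, ha⟩ := ho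
      rcases Nat.eq_zero_or_pos a with ha0 | ha0
      · exact Or.inr ⟨0, by omega⟩
      · exfalso
        obtain ⟨i, hi⟩ := Nat.exists_testBit_of_ne_zero (by omega : a ≠ 0)
        have := congrArg (fun x => x.testBit (i + 1)) h
        simp only [Nat.testBit_and, Nat.zero_testBit] at this
        rw [Nat.testBit_add_one, Nat.testBit_add_one] at this
        rw [show n / 2 = a from by omega, show (n - 1) / 2 = a from by omega] at this
        simp [hi] at this

theorem bitLength_pow_sub_one (b : Nat) (hb : 1 ≤ b) :
    PySem.Int.bitLength (((2 ^ b - 1 : Nat) : Int)) = b := by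
  set L := PySem.Int.bitLength (((2 ^ b - 1 : Nat) : Int)) with hL
  have hb2 : 2 ≤ 2 ^ b := by
    calc 2 = 2 ^ 1 := rfl
    _ ≤ 2 ^ b := Nat.pow_le_pow_right (by omega) hb
  have hne : ((2 ^ b - 1 : Nat) : Int) ≠ 0 := by
    simp only [ne_eq, Nat.cast_eq_zero]
    omega
  have hub := PySem.Int.lt_two_pow_bitLength (((2 ^ b - 1 : Nat) : Int))
  have hlb := PySem.Int.two_pow_bitLength_le (((2 ^ b - 1 : Nat) : Int)) hne
  rw [Int.natAbs_natCast] at hub hlb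
  rw [← hL] at hub hlb
  have hL1 : 1 ≤ L := by
    by_contra hc
    have : L = 0 := by omega
    rw [this] at hub
    omega
  have h1 : L - 1 < b := by
    by_contra hc
    have : 2 ^ b ≤ 2 ^ (L - 1) := Nat.pow_le_pow_right (by omega) (by omega)
    omega
  have h2 : b ≤ L := by
    by_contra hc
    have : 2 ^ L ≤ 2 ^ (b - 1) := Nat.pow_le_pow_right (by omega) (by omega)
    have hhalf : 2 ^ b = 2 * 2 ^ (b - 1) := by
      rw [← pow_succ']
      congr 1
      omega
    omega
  omega

theorem bitLength_pow (k : Nat) :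
    PySem.Int.bitLength (((2 ^ k : Nat) : Int)) = k + 1 := by
  set L := PySem.Int.bitLength (((2 ^ k : Nat) : Int)) with hL
  have hne : ((2 ^ k : Nat) : Int) ≠ 0 := by
    simp only [ne_eq, Nat.cast_eq_zero]
    positivity
  have hub := PySem.Int.lt_two_pow_bitLength (((2 ^ k : Nat) : Int))
  have hlb := PySem.Int.two_pow_bitLength_le (((2 ^ k : Nat) : Int)) hne
  rw [Int.natAbs_natCast] at hub hlb
  rw [← hL] at hub hlb
  have h1 : k < L := (Nat.pow_lt_pow_iff_right (by omega)).mp hub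
  have h2 : L - 1 ≤ k := by
    by_contra hc
    have : 2 ^ (k + 1) ≤ 2 ^ (L - 1) := Nat.pow_le_pow_right (by omega) (by omega)
    have : 2 ^ (k + 1) = 2 * 2 ^ k := by rw [← pow_succ']
    omega
  omega

-- explicit bit expansions of the two mask shapes
theorem altBits_ones (k m : Nat) (hm : m ≤ k) :
    altBits k (((2 ^ m - 1 : Nat) : Int)) = List.replicate m 1 ++ List.replicate (k - m) 0 := by
  induction k generalizing m with
  | zero =>
    have : m = 0 := by omega
    subst this
    rfl
  | succ k ih =>
    cases m with
    | zero =>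
      simpa using altBits_zero (k + 1)
    | succ m =>
      have hp : 1 ≤ 2 ^ m := Nat.one_le_two_pow
      have hps : 2 ^ (m + 1) = 2 * 2 ^ m := by rw [← pow_succ']
      simp only [altBits, modCast, divCast]
      rw [show (2 ^ (m + 1) - 1) % 2 = 1 from by omega,
          show (2 ^ (m + 1) - 1) / 2 = 2 ^ m - 1 from by omega]
      rw [ih m (by omega)]
      simp [List.replicate_succ]

theorem altBits_hi (k j : Nat) (hj : j ≤ k) :
    altBits k (((2 ^ k - 2 ^ j : Nat) : Int)) = List.replicate j 0 ++ List.replicate (k - j) 1 := by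
  induction j generalizing k with
  | zero =>
    have := altBits_ones k k le_rfl
    simpa [pow_zero] using this
  | succ j ih =>
    cases k with
    | zero => omega
    | succ k =>
      have hp : 2 ^ (k + 1) = 2 * 2 ^ k := by rw [← pow_succ']
      have hq : 2 ^ (j + 1) = 2 * 2 ^ j := by rw [← pow_succ']
      have hjk : 2 ^ j ≤ 2 ^ k := Nat.pow_le_pow_right (by omega) (by omega)
      simp only [altBits, modCast, divCast]
      rw [show (2 ^ (k + 1) - 2 ^ (j + 1)) % 2 = 0 from by omega,
          show (2 ^ (k + 1) - 2 ^ (j + 1)) / 2 = 2 ^ k - 2 ^ j from by omega]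
      rw [ih k (by omega)]
      simp [List.replicate_succ]

-- value recovery from the LSB-first expansion
def ofBits : List Int → Int
  | [] => 0
  | b :: rest => b + 2 * ofBits rest

theorem ofBits_altBits (k v : Nat) :
    ofBits (altBits k ((v : Nat) : Int)) = ((v % 2 ^ k : Nat) : Int) := by
  induction k generalizing v with
  | zero => simp [altBits, ofBits]
  | succ k ih =>
    simp only [altBits, modCast, divCast, ofBits, ih (v / 2)]
    have hsplit : v % 2 ^ (k + 1) = v % 2 + 2 * (v / 2 % 2 ^ k) := by
      have h1 : 2 ^ (k + 1) = 2 * 2 ^ k := by rw [← pow_succ']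
      rw [h1, Nat.mod_mul]
    rw [hsplit]
    push_cast
    ring

theorem altBits_inj (v u : Nat) (hv : v < 2 ^ 32) (hu : u < 2 ^ 32)
    (h : altBits 32 ((v : Nat) : Int) = altBits 32 ((u : Nat) : Int)) : v = u := by
  have := congrArg ofBits h
  rw [ofBits_altBits, ofBits_altBits, Nat.mod_eq_of_lt hv, Nat.mod_eq_of_lt hu] at this
  exact_mod_cast this

-- ===== run-list computation and decomposition =====

theorem altRuns_replicate_cont (n : Nat) (c : Int) (k : Int) (rs : List (Int × Int)) (rest : List Int) :
    altRuns (List.replicate n c ++ rest) ((c, k) :: rs) = altRuns rest ((c, k + n) :: rs) := by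
  induction n generalizing k with
  | zero => simp [List.replicate]
  | succ n ih =>
    rw [List.replicate_succ, List.cons_append]
    simp only [altRuns, beq_self_eq_true, if_true]
    rw [ih (k + 1)]
    congr 2
    push_cast
    ring

theorem runs_one (a : Nat) (ha : 1 ≤ a) (x : Int) :
    altRuns (List.replicate a x) [] = [(x, (a : Int))] := by
  obtain ⟨a', rfl⟩ : ∃ a', a = a' + 1 := ⟨a - 1, by omega⟩
  rw [List.replicate_succ]
  simp only [altRuns]
  have := altRuns_replicate_cont a' x 1 [] []
  rw [List.append_nil] at this
  rw [this]
  simp only [altRuns]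
  congr 2
  push_cast
  ring

theorem runs_two (a b : Nat) (x y : Int) (ha : 1 ≤ a) (hb : 1 ≤ b) (hxy : x ≠ y) :
    altRuns (List.replicate a x ++ List.replicate b y) [] = [(y, (b : Int)), (x, (a : Int))] := by
  obtain ⟨a', rfl⟩ : ∃ a', a = a' + 1 := ⟨a - 1, by omega⟩
  rw [List.replicate_succ, List.cons_append]
  simp only [altRuns]
  rw [altRuns_replicate_cont a' x 1 [] (List.replicate b y)]
  obtain ⟨b', rfl⟩ : ∃ b', b = b' + 1 := ⟨b - 1, by omega⟩
  rw [List.replicate_succ]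
  simp only [altRuns]
  have hne : (x == y) = false := by simpa using hxy
  rw [hne]
  simp only [Bool.false_eq_true, if_false]
  have := altRuns_replicate_cont b' y 1 [(x, 1 + (a' : Int))] []
  rw [List.append_nil] at this
  rw [this]
  simp only [altRuns]
  have hb2 : (1 : Int) + (b' : Int) = ((b' + 1 : Nat) : Int) := by push_cast; ring
  have ha2 : (1 : Int) + (a' : Int) = ((a' + 1 : Nat) : Int) := by push_cast; ring
  rw [hb2, ha2]

theorem runs_le_two (a b : Nat) (x y : Int) :
    (altRuns (List.replicate a x ++ List.replicate b y) []).length ≤ 2 := by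
  rcases Nat.eq_zero_or_pos a with ha | ha
  · subst ha
    simp only [List.replicate, List.nil_append]
    rcases Nat.eq_zero_or_pos b with hb | hb
    · subst hb; simp [List.replicate, altRuns]
    · rw [runs_one b hb y]; simp
  · by_cases hxy : x = y
    · subst hxy
      rw [← List.replicate_add, runs_one (a + b) (by omega) x]
      simp
    · rcases Nat.eq_zero_or_pos b with hb | hb
      · subst hb
        simp only [List.replicate, List.append_nil]
        rw [runs_one a ha x]; simp
      · rw [runs_two a b x y ha hb hxy]; simp

-- decomposition: the input can be read back off the run list
def expandR (rs : List (Int × Int)) : List Int :=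
  rs.reverse.flatMap (fun p => List.replicate p.2.toNat p.1)

theorem expandR_cons (c : Int) (k : Int) (rs : List (Int × Int)) :
    expandR ((c, k) :: rs) = expandR rs ++ List.replicate k.toNat c := by
  simp [expandR]

theorem altRuns_expand (bs : List Int) (acc : List (Int × Int))
    (hacc : ∀ p ∈ acc, 1 ≤ p.2) :
    expandR (altRuns bs acc) = expandR acc ++ bs ∧ ∀ p ∈ altRuns bs acc, 1 ≤ p.2 := by
  induction bs generalizing acc with
  | nil =>
    refine ⟨by simp [altRuns], ?_⟩
    simp only [altRuns]
    exact hacc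
  | cons b rest ih =>
    cases acc with
    | nil =>
      simp only [altRuns]
      obtain ⟨h1, h2⟩ := ih [(b, 1)] (by simp)
      refine ⟨?_, h2⟩
      rw [h1]
      simp [expandR]
    | cons p rs =>
      obtain ⟨c, k⟩ := p
      have hk : 1 ≤ k := hacc (c, k) (List.mem_cons_self ..)
      have hrs : ∀ p ∈ rs, 1 ≤ p.2 := fun p hp => hacc p (List.mem_cons_of_mem _ hp)
      simp only [altRuns]
      by_cases hcb : (c == b) = true
      · rw [if_pos hcb]
        have hcb' : c = b := by simpa using hcb
        obtain ⟨h1, h2⟩ := ih ((c, k + 1) :: rs) (by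
          intro p hp
          rcases List.mem_cons.mp hp with rfl | hp
          · simp; omega
          · exact hrs p hp)
        refine ⟨?_, h2⟩
        rw [h1, expandR_cons, expandR_cons]
        have htn : (k + 1).toNat = k.toNat + 1 := by omega
        rw [htn, List.replicate_succ' ..]
        simp [hcb']
      · rw [if_neg hcb]
        obtain ⟨h1, h2⟩ := ih ((b, 1) :: (c, k) :: rs) (by
          intro p hp
          rcases List.mem_cons.mp hp with rfl | hp
          · simp
          · exact hacc p hp)
        refine ⟨?_, h2⟩
        rw [h1, expandR_cons]
        simp

-- ===== the master classification lemma =====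

theorem classify (v : Nat) (hv : v < 2 ^ 32) :
    G (altRuns (bitsBE 32 v) []) 32 =
      (if ((v : Int) == 0 || (v : Int) == 4294967295) = true then (32 : Int)
       else if (PySem.Int.band ((v : Int) + 1) (v : Int) == 0) = true then
         32 - (PySem.Int.bitLength ((v : Int)) : Int)
       else if (PySem.Int.band (4294967296 - (v : Int)) (4294967296 - (v : Int) - 1) == 0) = true then
         32 - ((PySem.Int.bitLength ((4294967296 - (v : Int))) : Int) - 1)
       else 0) := by
  -- cast the three conditions down to Nat
  have e1a : ((v : Int) == 0) = decide (v = 0) := by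
    rw [beq_eq_decide]
    exact decide_eq_decide.mpr (by omega)
  have e1b : ((v : Int) == 4294967295) = decide (v = 4294967295) := by
    rw [beq_eq_decide]
    exact decide_eq_decide.mpr (by omega)
  have e1 : ((v : Int) == 0 || (v : Int) == 4294967295) = (decide (v = 0) || decide (v = 4294967295)) := by
    rw [e1a, e1b]
  have ecast : (v : Int) + 1 = (((v + 1 : Nat)) : Int) := by push_cast; ring
  have e2 : PySem.Int.band ((v : Int) + 1) (v : Int) = (((v + 1) &&& v : Nat) : Int) := by
    rw [ecast]
    exact PySem.Int.band_natCast (v + 1) v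
  have ew : (4294967296 - (v : Int)) = (((2 ^ 32 - v : Nat)) : Int) := by
    have : (2 ^ 32 : Nat) = 4294967296 := by norm_num
    push_cast [this]
    omega
  have hw1 : 1 ≤ 2 ^ 32 - v := by omega
  have ew1 : (((2 ^ 32 - v : Nat)) : Int) - 1 = (((2 ^ 32 - v - 1 : Nat)) : Int) := by
    push_cast
    omega
  have e3 : PySem.Int.band (4294967296 - (v : Int)) (4294967296 - (v : Int) - 1)
      = ((((2 ^ 32 - v) &&& (2 ^ 32 - v - 1) : Nat)) : Int) := by
    rw [ew, ew1]
    exact PySem.Int.band_natCast (2 ^ 32 - v) (2 ^ 32 - v - 1)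
  have hlen : (bitsBE 32 v).length = 32 := bitsBE_length 32 v
  -- decompose the run list
  obtain ⟨hexp, hwf⟩ := altRuns_expand (bitsBE 32 v) [] (by simp)
  match hruns : altRuns (bitsBE 32 v) [] with
  | [] =>
    exfalso
    rw [hruns] at hexp
    have := congrArg List.length hexp
    simp [expandR, hlen] at this
  | [(c, k)] =>
    -- a single run: v = 0 or v = 2^32 - 1
    rw [hruns] at hexp hwf
    have hk : 1 ≤ k := hwf (c, k) (List.mem_cons_self ..)
    have hbs : bitsBE 32 v = List.replicate k.toNat c := by
      simpa [expandR] using hexp.symm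
    have hk32 : k.toNat = 32 := by
      have := congrArg List.length hbs
      simp [hlen] at this
      omega
    have hc : c = 0 ∨ c = 1 := by
      apply bitsBE_bits 32 v
      rw [hbs, hk32]
      exact List.mem_replicate.mpr ⟨by omega, rfl⟩
    have hrev : altBits 32 ((v : Nat) : Int) = (List.replicate 32 c) := by
      have : (altBits 32 ((v : Nat) : Int)).reverse = List.replicate 32 c := by
        rw [show (altBits 32 ((v : Nat) : Int)).reverse = bitsBE 32 v from rfl, hbs, hk32]
      rw [← List.reverse_reverse (altBits 32 ((v : Nat) : Int)), this, List.reverse_replicate]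
    rcases hc with rfl | rfl
    · -- all zeros: v = 0
      have hv0 : v = 0 := by
        apply altBits_inj v 0 hv (by norm_num)
        rw [hrev, show ((0 : Nat) : Int) = (((0 : Nat)) : Int) from rfl, altBits_zero]
      subst hv0
      rw [e1]
      simp [G]
    · -- all ones: v = 2^32 - 1
      have hv1 : v = 2 ^ 32 - 1 := by
        apply altBits_inj v (2 ^ 32 - 1) hv (by norm_num)
        rw [hrev, altBits_ones 32 32 le_rfl]
        simp
      subst hv1
      rw [e1]
      norm_num [G]
  | [(c2, k2), (c1, k1)] =>
    -- two runs: leading run (c1, k1), trailing run (c2, k2)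
    rw [hruns] at hexp hwf
    have hk1 : 1 ≤ k1 := hwf (c1, k1) (by simp)
    have hk2 : 1 ≤ k2 := hwf (c2, k2) (by simp)
    set a := k1.toNat with ha
    set b := k2.toNat with hb
    have ha1 : 1 ≤ a := by omega
    have hb1 : 1 ≤ b := by omega
    have hbs : bitsBE 32 v = List.replicate a c1 ++ List.replicate b c2 := by
      simpa [expandR] using hexp.symm
    have hab : a + b = 32 := by
      have := congrArg List.length hbs
      simp [hlen] at this
      omega
    have hc1 : c1 = 0 ∨ c1 = 1 := by
      apply bitsBE_bits 32 v
      rw [hbs]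
      exact List.mem_append.mpr (Or.inl (List.mem_replicate.mpr ⟨by omega, rfl⟩))
    have hc2 : c2 = 0 ∨ c2 = 1 := by
      apply bitsBE_bits 32 v
      rw [hbs]
      exact List.mem_append.mpr (Or.inr (List.mem_replicate.mpr ⟨by omega, rfl⟩))
    have hcc : c1 ≠ c2 := by
      intro hcc
      subst hcc
      rw [hbs, ← List.replicate_add, runs_one (a + b) (by omega) c1] at hruns
      simp at hruns
    have hrev : altBits 32 ((v : Nat) : Int) = List.replicate b c2 ++ List.replicate a c1 := by
      rw [← List.reverse_reverse (altBits 32 ((v : Nat) : Int)),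
        show (altBits 32 ((v : Nat) : Int)).reverse = bitsBE 32 v from rfl, hbs]
      simp [List.reverse_append, List.reverse_replicate]
    have hkk1 : k1 = (a : Int) := by omega
    have hG : G [(c2, k2), (c1, k1)] 32 = (a : Int) := by
      simp [G, hkk1]
    rw [hG]
    rcases hc1 with rfl | rfl
    · -- leading zeros then ones: v = 2^b - 1
      have hc2' : c2 = 1 := by omega
      subst hc2'
      have hvv : v = 2 ^ b - 1 := by
        apply altBits_inj v (2 ^ b - 1) hv (by
          have : 2 ^ b ≤ 2 ^ 32 := Nat.pow_le_pow_right (by omega) (by omega)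
          omega)
        rw [hrev, altBits_ones 32 b (by omega), show 32 - b = a from by omega]
      have hbpow2 : 2 ≤ 2 ^ b := by
        calc 2 = 2 ^ 1 := rfl
        _ ≤ 2 ^ b := Nat.pow_le_pow_right (by omega) hb1
      have hble : 2 ^ b ≤ 2 ^ 31 := Nat.pow_le_pow_right (by omega) (by omega)
      subst hvv
      -- condition 1 is false
      rw [e1]
      have hne0 : ¬(2 ^ b - 1 = 0) := by omega
      have hnemax : ¬(2 ^ b - 1 = 4294967295) := by norm_num at hble ⊢; omega
      simp only [hne0, hnemax, decide_false, Bool.or_false]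
      -- condition 2 is true
      rw [e2]
      have hsucc : 2 ^ b - 1 + 1 = 2 ^ b := by omega
      rw [hsucc, show 2 ^ b &&& (2 ^ b - 1) = 0 from land_pow_pred b,
        bitLength_pow_sub_one b hb1]
      norm_num
      omega
    · -- leading ones then zeros: v = 2^32 - 2^b
      have hc2' : c2 = 0 := by omega
      subst hc2'
      have hble : 2 ^ b ≤ 2 ^ 31 := Nat.pow_le_pow_right (by omega) (by omega)
      have hbpow2 : 2 ≤ 2 ^ b := by
        calc 2 = 2 ^ 1 := rfl
        _ ≤ 2 ^ b := Nat.pow_le_pow_right (by omega) hb1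
      have hvv : v = 2 ^ 32 - 2 ^ b := by
        apply altBits_inj v (2 ^ 32 - 2 ^ b) hv (by omega)
        rw [hrev, altBits_hi 32 b (by omega), show 32 - b = a from by omega]
      subst hvv
      have h31 : (2 ^ 31 : Nat) = 2147483648 := by norm_num
      -- condition 1 is false
      rw [e1]
      have hne0 : ¬(2 ^ 32 - 2 ^ b = 0) := by norm_num at hble ⊢; omega
      have hnemax : ¬(2 ^ 32 - 2 ^ b = 4294967295) := by norm_num at hbpow2 ⊢; omega
      simp only [hne0, hnemax, decide_false, Bool.or_false]
      -- condition 2 is false: 2^32 - 2^b + 1 is odd and > 1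
      rw [e2]
      have hodd : (2 ^ 32 - 2 ^ b + 1) % 2 = 1 := by
        have hb2 : 2 ^ b % 2 = 0 := by
          have : 2 ^ b = 2 * 2 ^ (b - 1) := by
            rw [← pow_succ']
            congr 1
            omega
          omega
        norm_num at hble ⊢
        omega
      have hc2false : ¬((2 ^ 32 - 2 ^ b + 1) &&& (2 ^ 32 - 2 ^ b) = 0) := by
        intro hz
        have hpred : 2 ^ 32 - 2 ^ b = (2 ^ 32 - 2 ^ b + 1) - 1 := by omega
        rw [hpred] at hz
        rcases land_pred_pow (2 ^ 32 - 2 ^ b + 1) hz with h0 | ⟨m, hm⟩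
        · omega
        · rcases Nat.eq_zero_or_pos m with rfl | hm1
          · norm_num at hm hble
            omega
          · have : 2 ^ m = 2 * 2 ^ (m - 1) := by
              rw [← pow_succ']
              congr 1
              omega
            omega
      have hc2f : ((((2 ^ 32 - 2 ^ b + 1) &&& (2 ^ 32 - 2 ^ b) : Nat) : Int) == 0) = false := by
        simp only [beq_eq_false_iff_ne, ne_eq, Nat.cast_eq_zero]
        exact hc2false
      rw [show (2 ^ 32 - 2 ^ b + 1 : Nat) = (2 ^ 32 - 2 ^ b) + 1 from rfl] at hc2f
      rw [hc2f]
      simp only [Bool.false_eq_true, if_false]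
      -- condition 3 is true: w = 2^b
      rw [e3]
      rw [show (2 ^ 32 - (2 ^ 32 - 2 ^ b) : Nat) = 2 ^ b from by omega,
        show 2 ^ b &&& (2 ^ b - 1) = 0 from land_pow_pred b,
        ew, show (2 ^ 32 - (2 ^ 32 - 2 ^ b) : Nat) = 2 ^ b from by omega, bitLength_pow b]
      norm_num
      omega
  | (p1 :: p2 :: p3 :: tl) =>
    -- three or more runs: the scan returns 0, and none of B's conditions can hold
    have hG : G (p1 :: p2 :: p3 :: tl) 32 = 0 := G_of_three_le _ _ (by simp)
    rw [hG]
    have hle : ∀ (a' b' : Nat) (x y : Int),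
        bitsBE 32 v ≠ List.replicate a' x ++ List.replicate b' y := by
      intro a' b' x y hcontra
      have := runs_le_two a' b' x y
      rw [← hcontra, hruns] at this
      simp at this
    -- helper: from an explicit altBits form, a contradiction
    have habs : ∀ (u : Nat) (a' b' : Nat) (x y : Int), u < 2 ^ 32 → v = u →
        altBits 32 ((u : Nat) : Int) = List.replicate b' y ++ List.replicate a' x →
        False := by
      intro u a' b' x y hu hvu hform
      apply hle a' b' x y
      rw [hvu]
      show (altBits 32 ((u : Nat) : Int)).reverse = _
      rw [hform]
      simp [List.reverse_append, List.reverse_replicate]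
    -- condition 1 is false
    have hne0 : ¬(v = 0) := by
      intro h0
      exact habs 0 32 0 0 0 (by norm_num) h0
        (by rw [altBits_zero]; simp)
    have hnemax : ¬(v = 4294967295) := by
      intro h0
      refine habs 4294967295 32 0 1 0 (by norm_num) h0 ?_
      have := altBits_ones 32 32 le_rfl
      norm_num at this ⊢
      simpa using this
    rw [e1]
    simp only [hne0, hnemax, decide_false, Bool.or_false]
    -- condition 2 is false
    have hc2 : ¬((v + 1) &&& v = 0) := by
      intro hz
      have hpred : v = (v + 1) - 1 := by omega
      rw [hpred] at hz
      rcases land_pred_pow (v + 1) hz with h0 | ⟨m, hm⟩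
      · omega
      · have hm32 : m ≤ 32 := by
          by_contra hc
          have : 2 ^ 33 ≤ 2 ^ m := Nat.pow_le_pow_right (by omega) (by omega)
          norm_num at this
          omega
        exact habs (2 ^ m - 1) (32 - m) m 0 1
          (by have : 2 ^ m ≤ 2 ^ 32 := Nat.pow_le_pow_right (by omega) hm32; omega)
          (by omega)
          (by rw [altBits_ones 32 m hm32])
    have hc2f : ((((v + 1) &&& v : Nat) : Int) == 0) = false := by
      simp only [beq_eq_false_iff_ne, ne_eq, Nat.cast_eq_zero]
      exact hc2
    rw [e2, hc2f]
    simp only [Bool.false_eq_true, if_false]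
    -- condition 3 is false
    have hc3 : ¬((2 ^ 32 - v) &&& (2 ^ 32 - v - 1) = 0) := by
      intro hz
      rcases land_pred_pow (2 ^ 32 - v) hz with h0 | ⟨m, hm⟩
      · omega
      · have hm32 : m ≤ 32 := by
          by_contra hc
          have : 2 ^ 33 ≤ 2 ^ m := Nat.pow_le_pow_right (by omega) (by omega)
          norm_num at this
          omega
        exact habs (2 ^ 32 - 2 ^ m) (32 - m) m 1 0
          (by have : 1 ≤ 2 ^ m := Nat.one_le_two_pow; omega)
          (by omega)
          (by rw [show (2 ^ 32 - 2 ^ m : Nat) = 2 ^ 32 - 2 ^ m from rfl, altBits_hi 32 m hm32])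
    have hc3f : ((((2 ^ 32 - v) &&& (2 ^ 32 - v - 1) : Nat) : Int) == 0) = false := by
      simp only [beq_eq_false_iff_ne, ne_eq, Nat.cast_eq_zero]
      exact hc3
    rw [e3, hc3f]
    simp

-- ===== glue lemmas reused from the A-side unfolding =====

theorem toDigits_two_length_pos (vn : Nat) : 0 < (Nat.toDigits 2 vn).length := by
  by_cases h : vn < 2
  · rw [toDigits_small 2 vn h]; simp
  · rw [toDigits_step 2 vn le_rfl (by omega)]; simp

-- ===== VERDICT (by name: the statement is the Claim_ definition above) =====
theorem ValidMask_spec : Claim_equal_ValidMask := by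
  intro s _
  show ValidMask s = ValidMask_alt s
  unfold ValidMask ValidMask_alt DotDec2Int ValidateIP
  generalize (PySem.Str.split? s ".").getD [] = quads
  by_cases hlen : quads.length = 4
  · simp only [hlen, ne_eq, not_true_eq_false, if_false]
    cases hv : vipLoop quads with
    | false =>
      have hnone : altParse quads 0 = none := by
        have := vipLoop_eq_isSome quads 0
        rw [hv] at this
        cases h : altParse quads 0 with
        | none => rfl
        | some r => rw [h] at this; simp at this
      rw [altParse_eq] at hnone
      cases hm : quads.mapM PySem.Int.ofStr? with
      | none => simp
      | some vals =>
        rw [hm] at hnone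
        simp only at hnone
        by_cases hany : vals.any (fun n => decide (n < 0) || decide (255 < n)) = true
        · simp [hany]
        · rw [if_neg hany] at hnone
          simp at hnone
    | true =>
      have hsome := vipLoop_eq_isSome quads 0
      rw [hv] at hsome
      obtain ⟨r, hr⟩ := Option.isSome_iff_exists.mp hsome.symm
      obtain ⟨hr0, hrub⟩ := altParse_bounds quads 0 r le_rfl hr
      rw [hlen] at hrub
      have hrlt : r < 4294967296 := by norm_num at hrub; omega
      have hvn : r.toNat < 2 ^ 32 := by omega
      have hdd : parseHex16 (ddLoop quads []) = r := ddLoop_parse quads [] 0 r le_rfl hr rfl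
      -- B side: read mapM / range check / value off altParse
      have hb := hr
      rw [altParse_eq] at hb
      cases hm : quads.mapM PySem.Int.ofStr? with
      | none => rw [hm] at hb; simp at hb
      | some vals =>
        rw [hm] at hb
        simp only at hb
        by_cases hany : vals.any (fun n => decide (n < 0) || decide (255 < n)) = true
        · rw [if_pos hany] at hb; simp at hb
        · rw [if_neg hany] at hb
          simp only [Option.some.injEq] at hb
          have hvlen : vals.length = 4 := by rw [mapM_len quads vals hm, hlen]
          rcases vals with _ | ⟨a, _ | ⟨b', _ | ⟨c', _ | ⟨d', _ | ⟨e, t⟩⟩⟩⟩⟩ <;>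
            simp only [List.length_cons, List.length_nil] at hvlen <;> try omega
          simp only [List.foldl_cons, List.foldl_nil] at hb
          have hveq : ((a * 256 + b') * 256 + c') * 256 + d' = r := by
            rw [← hb]; ring
          simp only [hany, Bool.false_eq_true, if_false]
          rw [hveq]
          -- A side: reduce to the scan over the padded bit string
          simp only [hdd, show (true == false) = false from rfl, Bool.false_eq_true, if_false]
          have hbin : PySem.Int.toBinChars0b r = '0' :: 'b' :: Nat.toDigits 2 r.toNat := by
            rw [PySem.Int.toBinChars0b, if_neg (by omega)]
          rw [hbin]
          have hdrop : ('0' :: 'b' :: Nat.toDigits 2 r.toNat).drop 2 = Nat.toDigits 2 r.toNat := rfl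
          rw [hdrop]
          have hL1 : 0 < (Nat.toDigits 2 r.toNat).length := toDigits_two_length_pos r.toNat
          have hL32 : (Nat.toDigits 2 r.toNat).length ≤ 32 :=
            Nat.toDigits_length 2 r.toNat 32 (by norm_num) hvn
          rw [PySem.List.slice_from_neg_ofNat _ 32 (by omega)]
          have hlen2 : (List.replicate 32 '0' ++ Nat.toDigits 2 r.toNat).length - 32
              = (Nat.toDigits 2 r.toNat).length := by
            simp only [List.length_append, List.length_replicate]
            omega
          rw [hlen2, List.drop_append_of_le_length (by simp [hL32]), List.drop_replicate]
          rw [padBits 32 r.toNat (by norm_num) hvn]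
          have hrcast : (r.toNat : Int) = r := Int.toNat_of_nonneg hr0
          -- run the scan
          have hlenb := bitsBE_length 32 r.toNat
          have hmem := bitsBE_bits 32 r.toNat
          cases hbits : bitsBE 32 r.toNat with
          | nil => rw [hbits] at hlenb; simp at hlenb
          | cons b0 bs1 =>
            rw [hbits] at hlenb hmem
            have hb0 : b0 = 0 ∨ b0 = 1 := hmem b0 (List.mem_cons_self ..)
            have hbs1 : ∀ x ∈ bs1, x = 0 ∨ x = 1 := fun x hx => hmem x (List.mem_cons_of_mem _ hx)
            have hcbit : (PySem.List.pyGet? (bitChar b0 :: List.map bitChar bs1) 0).getD '0' = bitChar b0 := by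
              simp [PySem.List.pyGet?, PySem.List.pyIdx?]
            rw [List.map_cons, hcbit]
            have hstep : vmLoop (bitChar b0 :: List.map bitChar bs1) 0 0 (bitChar b0) false
                = vmLoop (List.map bitChar bs1) 0 1 (bitChar b0) false := by
              simp [vmLoop]
            rw [hstep, phase1 bs1 b0 1 hbs1 hb0 le_rfl]
            have hruns : altRuns (b0 :: bs1) [] = altRuns bs1 [(b0, 1)] := rfl
            have htot : (1 : Int) + (bs1.length : Int) = 32 := by
              simp only [List.length_cons] at hlenb
              omega
            rw [htot, ← hruns, ← hbits]
            rw [classify r.toNat hvn]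
            rw [hrcast]
  · simp [hlen]
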